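-- pv_equiv track=rewrite | github.com/honux77/retroarch-rom-manager | screenScraper.py | getGameImages
-- ===== SOURCE A (Python) =====
-- def getGameImages(gameData, imageTypes=None):
--     """
--     게임 데이터에서 이미지 URL 추출
--
--     Args:
--         gameData: searchGame에서 반환된 게임 데이터
--         imageTypes: 원하는 이미지 타입 리스트 (예: ['ss', 'box-2D', 'wheel'])
--
--     Returns:
--         이미지 타입별 URL 딕셔너리
--     """
--     if not gameData or 'medias' not in gameData:
--         return {}
--
--     if imageTypes is None:
--         imageTypes = ['ss', 'box-2D', 'box-3D', 'wheel', 'screenmarquee']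
--
--     images = {}
--     medias = gameData.get('medias', [])
--
--     for media in medias:
--         mediaType = media.get('type', '')
--         if mediaType in imageTypes:
--             # 지역 우선순위: kr > jp > wor > us > eu
--             url = media.get('url', '')
--             region = media.get('region', 'wor')
--
--             if mediaType not in images:
--                 images[mediaType] = {'url': url, 'region': region}
--             elif region in ['kr', 'jp'] and images[mediaType]['region'] not in ['kr', 'jp']:
--                 images[mediaType] = {'url': url, 'region': region}
--
--     return {k: v['url'] for k, v in images.items()}
-- ===== SOURCE B (Python) =====
-- def _bestUrl(entries):
--     for url, region in entries:
--         if region in ('kr', 'jp'):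
--             return url
--     return entries[0][0]
--
--
-- def getGameImages(gameData, imageTypes=None):
--     if not gameData or 'medias' not in gameData:
--         return {}
--
--     if imageTypes is None:
--         imageTypes = ['ss', 'box-2D', 'box-3D', 'wheel', 'screenmarquee']
--
--     # Pass 1: group the qualifying media entries by type, in first-seen order.
--     byType = {}
--     for media in gameData.get('medias', []):
--         mediaType = media.get('type', '')
--         if mediaType in imageTypes:
--             byType[mediaType] = byType.get(mediaType, []) + [
--                 (media.get('url', ''), media.get('region', 'wor'))
--             ]
--
--     # Pass 2: per type, pick the first kr/jp entry, else the first entry.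
--     return {t: _bestUrl(entries) for t, entries in byType.items()}
-- ===== Notes on version B (the rewrite author's own statement) =====
-- stated objective: alternative
-- what changed: A's single loop that compare-and-replaces the kept entry per type is decomposed into two passes: a grouping pass building an ordered dict from each qualifying media type to all its (url, region) entries, then a per-type selection pass picking the first kr/jp url, else the first url.
import Mathlib
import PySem

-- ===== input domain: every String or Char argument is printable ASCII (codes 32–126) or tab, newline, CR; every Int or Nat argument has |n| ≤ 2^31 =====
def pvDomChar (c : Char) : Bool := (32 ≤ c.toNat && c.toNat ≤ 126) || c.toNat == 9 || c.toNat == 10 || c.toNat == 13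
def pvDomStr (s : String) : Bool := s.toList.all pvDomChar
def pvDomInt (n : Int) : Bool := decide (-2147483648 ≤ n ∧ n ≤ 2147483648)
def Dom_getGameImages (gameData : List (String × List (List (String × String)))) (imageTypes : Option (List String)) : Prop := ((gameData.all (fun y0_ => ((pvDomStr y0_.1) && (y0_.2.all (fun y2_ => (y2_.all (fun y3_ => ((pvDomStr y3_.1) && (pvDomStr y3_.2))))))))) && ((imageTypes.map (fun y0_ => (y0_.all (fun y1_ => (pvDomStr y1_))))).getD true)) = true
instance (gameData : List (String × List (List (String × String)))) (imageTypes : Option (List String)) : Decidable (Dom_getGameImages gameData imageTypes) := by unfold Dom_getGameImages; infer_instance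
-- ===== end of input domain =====

-- B re-decomposes A's single compare-and-replace loop into a grouping pass (type → all its
-- (url, region) entries) followed by a per-type selection pass (first kr/jp url, else first url);
-- an alternative decomposition of the same cost, proved to return the same dict.

-- ===== PORT A =====
-- loop body of A's 'for media in medias' loop
def pvStepA (its : List String) (images : PySem.Dict String (String × String))
    (media : List (String × String)) : PySem.Dict String (String × String) :=
  let d := PySem.Dict.mk media
  let mediaType := d.getD "type" ""
  if mediaType ∈ its then
    let url := d.getD "url" ""
    let region := d.getD "region" "wor"
    match images.get? mediaType with
    | none => images.insert mediaType (url, region)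
    | some cur =>
        if (region = "kr" ∨ region = "jp") ∧ ¬(cur.2 = "kr" ∨ cur.2 = "jp") then
          images.insert mediaType (url, region)
        else images
  else images

def getGameImages (gameData : List (String × List (List (String × String)))) (imageTypes : Option (List String)) : List (String × String) :=
  if gameData = [] ∨ (PySem.Dict.mk gameData).contains "medias" = false then []
  else
    let its := imageTypes.getD ["ss", "box-2D", "box-3D", "wheel", "screenmarquee"]
    let medias := (PySem.Dict.mk gameData).getD "medias" []
    let images := medias.foldl (pvStepA its) PySem.Dict.empty
    images.items.map (fun p => (p.1, p.2.1))

-- ===== PORT B =====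
-- port of B's helper _bestUrl: first kr/jp url, else first url ('entries[0][0]' ported as headD;
-- B only calls it on nonempty lists, where headD coincides with entries[0])
def pvBestUrl (entries : List (String × String)) : String :=
  match entries.find? (fun e => e.2 == "kr" || e.2 == "jp") with
  | some e => e.1
  | none => (entries.headD ("", "")).1

-- loop body of B's grouping pass
def pvStepB (its : List String) (byType : PySem.Dict String (List (String × String)))
    (media : List (String × String)) : PySem.Dict String (List (String × String)) :=
  let d := PySem.Dict.mk media
  let mediaType := d.getD "type" ""
  if mediaType ∈ its then
    byType.insert mediaType
      (byType.getD mediaType [] ++ [(d.getD "url" "", d.getD "region" "wor")])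
  else byType

def getGameImages_alt (gameData : List (String × List (List (String × String)))) (imageTypes : Option (List String)) : List (String × String) :=
  if gameData = [] ∨ (PySem.Dict.mk gameData).contains "medias" = false then []
  else
    let its := imageTypes.getD ["ss", "box-2D", "box-3D", "wheel", "screenmarquee"]
    let byType := ((PySem.Dict.mk gameData).getD "medias" []).foldl (pvStepB its) PySem.Dict.empty
    byType.items.map (fun p => (p.1, pvBestUrl p.2))

-- ===== PRECONDITION & SPEC =====
def Spec_getGameImages (gameData : List (String × List (List (String × String)))) (imageTypes : Option (List String)) (out : List (String × String)) : Prop := out = getGameImages_alt gameData imageTypes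
instance (gameData : List (String × List (List (String × String)))) (imageTypes : Option (List String)) (out : List (String × String)) : Decidable (Spec_getGameImages gameData imageTypes out) := by unfold Spec_getGameImages; infer_instance

-- ===== CLAIM (what is proved, stated in full; the proofs are below) =====
def Claim_equal_getGameImages : Prop := ∀ (gameData : List (String × List (List (String × String)))) (imageTypes : Option (List String)), Dom_getGameImages gameData imageTypes → Spec_getGameImages gameData imageTypes (getGameImages gameData imageTypes)

-- ===== LEMMAS AND PROOFS =====

-- the entry A's loop keeps for a type, expressed on B's grouped list: first kr/jp entry, else first
def pvChoose (es : List (String × String)) : String × String :=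
  match es.find? (fun e => e.2 == "kr" || e.2 == "jp") with
  | some e => e
  | none => es.headD ("", "")

theorem pvBestUrl_eq (es : List (String × String)) : pvBestUrl es = (pvChoose es).1 := by
  unfold pvBestUrl pvChoose
  cases es.find? (fun e => e.2 == "kr" || e.2 == "jp") <;> rfl

theorem pvChoose_singleton (x : String × String) : pvChoose [x] = x := by
  unfold pvChoose
  cases hb : (x.2 == "kr" || x.2 == "jp") <;> simp [hb]

theorem pvChoose_append (es : List (String × String)) (x : String × String) (h : es ≠ []) :
    pvChoose (es ++ [x]) =
      if (x.2 = "kr" ∨ x.2 = "jp") ∧ ¬((pvChoose es).2 = "kr" ∨ (pvChoose es).2 = "jp") then x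
      else pvChoose es := by
  cases es with
  | nil => exact absurd rfl h
  | cons a es' =>
      unfold pvChoose
      rw [List.find?_append]
      cases hf : (a :: es').find? (fun e => e.2 == "kr" || e.2 == "jp") with
      | some e =>
          have := List.find?_some hf
          simp at this
          simp [this]
      | none =>
          have hall := List.find?_eq_none.mp hf
          have ha : ¬(a.2 = "kr" ∨ a.2 = "jp") := by
            have := hall a (List.mem_cons_self)
            simpa using this
          cases hb : (x.2 == "kr" || x.2 == "jp") with
          | true =>
              have hx : x.2 = "kr" ∨ x.2 = "jp" := by simpa using hb
              simp [hb, hx, ha]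
          | false =>
              have hx : ¬(x.2 = "kr" ∨ x.2 = "jp") := by simpa using hb
              simp [hb, hx]

theorem pvGet?_items_map {ν₁ ν₂ : Type} (g : ν₁ → ν₂) (B : PySem.Dict String ν₁) (k : String) :
    (PySem.Dict.mk (B.items.map (fun p => (p.1, g p.2)))).get? k = (B.get? k).map g := by
  obtain ⟨l⟩ := B
  induction l with
  | nil => rfl
  | cons p rest ih =>
      rw [show (PySem.Dict.mk (p :: rest)).items = (p :: rest) from rfl, List.map_cons,
        PySem.Dict.get?_mk_cons, show (PySem.Dict.mk (p :: rest)) = PySem.Dict.mk ((p.1, p.2) :: rest) from rfl,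
        PySem.Dict.get?_mk_cons]
      cases h : (p.1 == k) <;> simp_all

theorem pv_eq_of_mem_nodup_fst {α β : Type} {l : List (α × β)} (h : (l.map Prod.fst).Nodup)
    {a : α} {b b' : β} (h1 : (a, b) ∈ l) (h2 : (a, b') ∈ l) : b = b' := by
  induction l with
  | nil => cases h1
  | cons p rest ih =>
      simp only [List.map_cons, List.nodup_cons] at h
      rcases List.mem_cons.mp h1 with h1 | h1 <;> rcases List.mem_cons.mp h2 with h2 | h2
      · exact (Prod.ext_iff.mp (h1.trans h2.symm)).2
      · exact absurd (List.mem_map.mpr ⟨(a, b'), h2, by rw [← h1]⟩) h.1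
      · exact absurd (List.mem_map.mpr ⟨(a, b), h1, by rw [← h2]⟩) h.1
      · exact ih h.2 h1 h2

-- one step of the two loops preserves the relation 'A's dict = B's dict mapped through pvChoose'
theorem pvStep_inv (its : List String) (media : List (String × String))
    (I : PySem.Dict String (String × String)) (B : PySem.Dict String (List (String × String)))
    (hk : B.keys.Nodup)
    (h : I.items = B.items.map (fun p => (p.1, pvChoose p.2)))
    (hne : ∀ p ∈ B.items, p.2 ≠ []) :
    (pvStepA its I media).items = (pvStepB its B media).items.map (fun p => (p.1, pvChoose p.2))
    ∧ (∀ p ∈ (pvStepB its B media).items, p.2 ≠ [])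
    ∧ (pvStepB its B media).keys.Nodup := by
  unfold pvStepA pvStepB
  by_cases ht : (PySem.Dict.mk media).getD "type" "" ∈ its
  · simp only [ht, if_true]
    set t := (PySem.Dict.mk media).getD "type" "" with hT
    set u := (PySem.Dict.mk media).getD "url" "" with hU
    set r := (PySem.Dict.mk media).getD "region" "wor" with hR
    have hIg : I.get? t = (B.get? t).map pvChoose := by
      rw [show I = PySem.Dict.mk I.items from rfl, h]; exact pvGet?_items_map _ _ _
    cases hg : B.get? t with
    | none =>
        have hIn : I.get? t = none := by rw [hIg, hg]; rfl
        have hcB : B.contains t = false := by rw [PySem.Dict.contains_eq_isSome_get?, hg]; rfl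
        have hcI : I.contains t = false := by rw [PySem.Dict.contains_eq_isSome_get?, hIn]; rfl
        have hgD : B.getD t [] = [] := by rw [PySem.Dict.getD_eq_get?_getD, hg]; rfl
        rw [hIn]
        refine ⟨?_, ?_, PySem.Dict.nodup_keys_insert B _ _ hk⟩
        · rw [PySem.Dict.items_insert_of_not_contains I _ hcI,
            PySem.Dict.items_insert_of_not_contains B _ hcB, hgD, List.map_append, h]
          simp [pvChoose_singleton]
        · intro p hp
          rcases (PySem.Dict.mem_items_insert _ _ _ _).mp hp with hp | hp
          · rw [hp]; simp [hgD]
          · exact hne p hp.1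
    | some es =>
        have hes : es ≠ [] := hne (t, es) (PySem.Dict.mem_items_of_get?_eq_some B hg)
        have hIs : I.get? t = some (pvChoose es) := by rw [hIg, hg]; rfl
        have hcB : B.contains t = true := by rw [PySem.Dict.contains_eq_isSome_get?, hg]; rfl
        have hcI : I.contains t = true := by rw [PySem.Dict.contains_eq_isSome_get?, hIs]; rfl
        have hgD : B.getD t [] = es := by rw [PySem.Dict.getD_eq_get?_getD, hg]; rfl
        have hmem : (t, es) ∈ B.items := PySem.Dict.mem_items_of_get?_eq_some B hg
        have hkn : (B.items.map Prod.fst).Nodup := by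
          simpa only [PySem.Dict.keys] using hk
        rw [hIs]
        have hBitems : ((B.insert t (B.getD t [] ++ [(u, r)])).items)
            = B.items.map (fun p => if p.1 == t then (t, es ++ [(u, r)]) else p) := by
          rw [PySem.Dict.items_insert_of_contains B _ hcB, hgD]
        have hne' : ∀ p ∈ (B.insert t (B.getD t [] ++ [(u, r)])).items, p.2 ≠ [] := by
          intro p hp
          rcases (PySem.Dict.mem_items_insert _ _ _ _).mp hp with hp | hp
          · rw [hp]; simp
          · exact hne p hp.1
        have hnd' := PySem.Dict.nodup_keys_insert B t (B.getD t [] ++ [(u, r)]) hk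
        refine ⟨?_, hne', hnd'⟩
        change (if (r = "kr" ∨ r = "jp") ∧ ¬((pvChoose es).2 = "kr" ∨ (pvChoose es).2 = "jp") then
            I.insert t (u, r) else I).items
          = List.map (fun p => (p.1, pvChoose p.2)) (B.insert t (B.getD t [] ++ [(u, r)])).items
        by_cases hc : (r = "kr" ∨ r = "jp") ∧ ¬((pvChoose es).2 = "kr" ∨ (pvChoose es).2 = "jp")
        · rw [if_pos hc, PySem.Dict.items_insert_of_contains I _ hcI, hBitems, h,
            List.map_map, List.map_map]
          refine List.map_congr_left (fun p hp => ?_)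
          by_cases hpt : p.1 = t
          · have hpe : p.2 = es := pv_eq_of_mem_nodup_fst hkn (hpt ▸ hp) hmem
            simp only [Function.comp_apply, hpt, hpe, beq_self_eq_true, if_true]
            rw [pvChoose_append es (u, r) hes, if_pos hc]
          · simp [hpt]
        · rw [if_neg hc, hBitems, h, List.map_map]
          refine (List.map_congr_left (fun p hp => ?_)).symm
          by_cases hpt : p.1 = t
          · have hpe : p.2 = es := pv_eq_of_mem_nodup_fst hkn (hpt ▸ hp) hmem
            simp only [Function.comp_apply, hpt, hpe, beq_self_eq_true, if_true]
            rw [pvChoose_append es (u, r) hes, if_neg hc]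
          · simp [hpt]
  · simp only [ht, if_false]
    exact ⟨h, hne, hk⟩

theorem pvFold_inv (its : List String) (medias : List (List (String × String))) :
    ∀ (I : PySem.Dict String (String × String)) (B : PySem.Dict String (List (String × String))),
    B.keys.Nodup →
    I.items = B.items.map (fun p => (p.1, pvChoose p.2)) →
    (∀ p ∈ B.items, p.2 ≠ []) →
    (medias.foldl (pvStepA its) I).items
      = ((medias.foldl (pvStepB its) B).items).map (fun p => (p.1, pvChoose p.2)) := by
  induction medias with
  | nil => intro I B _ h _; exact h
  | cons m ms ih =>
      intro I B hk h hne
      obtain ⟨h1, h2, h3⟩ := pvStep_inv its m I B hk h hne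
      exact ih _ _ h3 h1 h2

-- ===== VERDICT (by name: the statement is the Claim_ definition above) =====
theorem getGameImages_spec : Claim_equal_getGameImages := by
  intro gameData imageTypes _
  unfold Spec_getGameImages getGameImages getGameImages_alt
  by_cases hg : gameData = [] ∨ (PySem.Dict.mk gameData).contains "medias" = false
  · simp only [hg, if_true]
  · simp only [hg, if_false]
    have hfold := pvFold_inv (imageTypes.getD ["ss", "box-2D", "box-3D", "wheel", "screenmarquee"])
      ((PySem.Dict.mk gameData).getD "medias" [])
      PySem.Dict.empty PySem.Dict.empty (PySem.Dict.nodup_keys_empty) rfl (by intro p hp; cases hp)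
    rw [hfold, List.map_map]
    exact List.map_congr_left (fun p _ => by simp [pvBestUrl_eq])
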